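-- pv_equiv track=rewrite | github.com/savek-cc/ha-nightscout-v3 | custom_components/nightscout_v3/statistics.py | _bucket_by_hour
-- ===== SOURCE A (Python) =====
-- from typing import Any
--
-- def _bucket_by_hour(entries: list[dict[str, Any]]) -> list[list[int]]:
--     buckets: list[list[int]] = [[] for _ in range(24)]
--     for e in entries:
--         sgv = e.get("sgv")
--         date = e.get("date")
--         if sgv is None or date is None:
--             continue
--         h = int((int(date) // 1000 % 86_400) // 3600)
--         buckets[h].append(int(sgv))
--     return buckets
-- ===== SOURCE B (Python) =====
-- def _bucket_by_hour(entries):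
--     def _hour(e):
--         return int((int(e["date"]) // 1000 % 86_400) // 3600)
--     return [
--         [int(e["sgv"]) for e in entries
--          if e.get("sgv") is not None and e.get("date") is not None and _hour(e) == h]
--         for h in range(24)
--     ]
-- ===== Notes on version B (the rewrite author's own statement) =====
-- stated objective: alternative
-- what changed: Replaces the single distributing pass with mutable index-addressed buckets by 24 independent filtering comprehensions, one per hour, building each bucket directly.
import Mathlib
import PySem

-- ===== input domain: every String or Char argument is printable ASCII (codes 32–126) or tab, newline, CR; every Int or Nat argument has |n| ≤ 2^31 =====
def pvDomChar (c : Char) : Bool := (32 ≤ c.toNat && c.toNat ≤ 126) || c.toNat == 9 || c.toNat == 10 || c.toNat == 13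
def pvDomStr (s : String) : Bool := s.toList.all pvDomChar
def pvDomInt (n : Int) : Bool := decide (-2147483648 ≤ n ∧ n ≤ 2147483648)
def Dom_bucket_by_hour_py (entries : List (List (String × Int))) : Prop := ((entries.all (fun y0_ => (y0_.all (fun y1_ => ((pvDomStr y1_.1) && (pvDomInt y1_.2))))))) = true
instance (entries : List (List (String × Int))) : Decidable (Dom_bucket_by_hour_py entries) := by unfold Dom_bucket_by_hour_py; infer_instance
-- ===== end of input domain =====

-- B builds the 24 buckets by 24 independent filtering passes (one list comprehension per
-- hour) instead of A's single distributing pass into index-addressed mutable buckets;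
-- objective: alternative decomposition (not faster).

-- ===== PORT A =====
-- hour formula: int((int(date) // 1000 % 86_400) // 3600)
def pvHourA (date : Int) : Int :=
  PySem.Int.floordiv (PySem.Int.mod (PySem.Int.floordiv date 1000) 86400) 3600

-- `buckets[h].append(int(sgv))`: pvHourA date ∈ [0, 24) (pvHour_bounds below), so the
-- plain Nat-index `modify` is exact Python list indexing here.
def bucket_by_hour_py (entries : List (List (String × Int))) : List (List Int) :=
  entries.foldl
    (fun buckets e =>
      match e.lookup "sgv", e.lookup "date" with
      | some sgv, some date => buckets.modify (pvHourA date).toNat (fun b => b ++ [sgv])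
      | _, _ => buckets)
    (List.replicate 24 [])

-- ===== PORT B =====
-- B's local helper _hour(e): same formula, transliterated separately for B
def pvHourB (date : Int) : Int :=
  PySem.Int.floordiv (PySem.Int.mod (PySem.Int.floordiv date 1000) 86400) 3600

-- the per-element test of B's inner comprehension for hour h
def pvSel (h : Int) (e : List (String × Int)) : Option Int :=
  match e.lookup "sgv" with
  | none => none
  | some sgv =>
    match e.lookup "date" with
    | none => none
    | some date => if pvHourB date = h then some sgv else none

def bucket_by_hour_py_alt (entries : List (List (String × Int))) : List (List Int) :=
  (PySem.List.pyRange 0 24 1).map (fun h => entries.filterMap (pvSel h))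

-- ===== PRECONDITION & SPEC =====
def Spec_bucket_by_hour_py (entries : List (List (String × Int))) (out : List (List Int)) : Prop := out = bucket_by_hour_py_alt entries
instance (entries : List (List (String × Int))) (out : List (List Int)) : Decidable (Spec_bucket_by_hour_py entries out) := by unfold Spec_bucket_by_hour_py; infer_instance

-- ===== CLAIM (what is proved, stated in full; the proofs are below) =====
def Claim_equal_bucket_by_hour_py : Prop := ∀ (entries : List (List (String × Int))), Dom_bucket_by_hour_py entries → Spec_bucket_by_hour_py entries (bucket_by_hour_py entries)

-- ===== LEMMAS AND PROOFS =====

theorem pvHour_eq (d : Int) : pvHourA d = pvHourB d := rfl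

theorem pvHour_bounds (d : Int) : 0 ≤ pvHourA d ∧ pvHourA d < 24 := by
  unfold pvHourA
  rw [PySem.Int.mod_eq_emod_of_pos (by norm_num),
      PySem.Int.floordiv_eq_ediv_of_pos (by norm_num)]
  omega

-- modifying one slot of a range-indexed table = re-describing the table pointwise
theorem pv_modify_map_range (g : Int → List Int) (d sgv : Int) :
    ((PySem.List.pyRange 0 24 1).map g).modify (pvHourA d).toNat (fun b => b ++ [sgv])
      = (PySem.List.pyRange 0 24 1).map
          (fun h => g h ++ if pvHourA d = h then [sgv] else []) := by
  have hb := pvHour_bounds d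
  apply List.ext_getElem
  · simp
  · intro k hk hk'
    have hk24 : k < 24 := by
      simpa [PySem.List.length_pyRange_one] using hk'
    rw [List.getElem_modify]
    simp only [List.getElem_map, PySem.List.getElem_pyRange_one]
    by_cases h : (pvHourA d).toNat = k
    · have h2 : pvHourA d = (k : Int) := by omega
      simp [h2]
    · have h2 : ¬ pvHourA d = (k : Int) := by omega
      simp [h, h2]

theorem pv_main (entries : List (List (String × Int))) (g : Int → List Int) :
    entries.foldl
      (fun buckets e =>
        match e.lookup "sgv", e.lookup "date" with
        | some sgv, some date => buckets.modify (pvHourA date).toNat (fun b => b ++ [sgv])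
        | _, _ => buckets)
      ((PySem.List.pyRange 0 24 1).map g)
    = (PySem.List.pyRange 0 24 1).map (fun h => g h ++ entries.filterMap (pvSel h)) := by
  induction entries generalizing g with
  | nil => simp
  | cons e rest ih =>
    simp only [List.foldl_cons]
    cases hs : e.lookup "sgv" with
    | none =>
      simp only [hs]
      rw [ih g]
      apply List.map_congr_left
      intro h _
      simp [pvSel, hs]
    | some sgv =>
      cases hd : e.lookup "date" with
      | none =>
        simp only [hs, hd]
        rw [ih g]
        apply List.map_congr_left
        intro h _
        simp [pvSel, hs, hd]
      | some date =>
        simp only [hs, hd]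
        rw [pv_modify_map_range g date sgv,
            ih (fun h => g h ++ if pvHourA date = h then [sgv] else [])]
        apply List.map_congr_left
        intro h _
        by_cases hh : pvHourA date = h <;>
          simp [pvSel, ← pvHour_eq, hs, hd, hh]

theorem pv_init : (List.replicate 24 ([] : List Int))
    = (PySem.List.pyRange 0 24 1).map (fun _ => []) := by decide

-- ===== VERDICT (by name: the statement is the Claim_ definition above) =====
theorem bucket_by_hour_py_spec : Claim_equal_bucket_by_hour_py := by
  intro entries _
  unfold Spec_bucket_by_hour_py bucket_by_hour_py bucket_by_hour_py_alt
  rw [pv_init, pv_main]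
  simp
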